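-- pv_equiv track=rewrite | github.com/Nastasia8/AaDS_1_147_2021 | 20.02.2021/task_7.py | maxbucv
-- ===== SOURCE A (Python) =====
-- def maxbucv(a):
--     i = 0
--     j = 0
--     k = 0
--     max = 0
--     while i < len(a):
--         while j < len(a[i]):
--             k = k + 1
--             j = j + 1
--         if k > max:
--             max = k
--         i = i + 1
--     if i == len(a):
--         return(max)
-- ===== SOURCE B (Python) =====
-- def maxbucv(a):
--     m = 0
--     for r in a:
--         n = len(r)
--         if n > m:
--             m = n
--     return m
-- ===== Notes on version B (the rewrite author's own statement) =====
-- stated objective: simpler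
-- what changed: Replaced A's nested while loops with never-reset counters j,k (which accidentally track the running max via prefix maxima) by a single pass over the rows taking len(r) directly and keeping a running maximum.
import Mathlib
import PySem

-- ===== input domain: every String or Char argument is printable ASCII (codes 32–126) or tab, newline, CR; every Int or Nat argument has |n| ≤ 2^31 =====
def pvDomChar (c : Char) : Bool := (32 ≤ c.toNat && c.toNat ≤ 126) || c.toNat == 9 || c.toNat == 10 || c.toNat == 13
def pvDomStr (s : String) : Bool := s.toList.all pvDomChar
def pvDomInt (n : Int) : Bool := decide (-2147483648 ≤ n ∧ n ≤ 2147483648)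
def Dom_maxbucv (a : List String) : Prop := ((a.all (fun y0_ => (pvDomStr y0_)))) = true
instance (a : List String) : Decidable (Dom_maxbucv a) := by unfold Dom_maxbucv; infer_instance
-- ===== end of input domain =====

-- B is a plain one-pass running maximum of len(r); A's nested whiles with never-reset j,k happen to compute the same value.

-- ===== PORT A =====
-- inner while: while j < len(a[i]): k += 1; j += 1
def maxbucvInner (n j k : Int) : Int × Int :=
  if j < n then maxbucvInner n (j + 1) (k + 1) else (j, k)
  termination_by (n - j).toNat
  decreasing_by omega

-- outer while over i (structural recursion over the remaining rows), state (j, k, max)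
def maxbucvLoop : List String → Int → Int → Int → Int
  | [], _, _, m => m
  | s :: rest, j, k, m =>
      let p := maxbucvInner ((s.toList.length : Int)) j k
      maxbucvLoop rest p.1 p.2 (if p.2 > m then p.2 else m)

def maxbucv (a : List String) : Int := maxbucvLoop a 0 0 0

-- ===== PORT B =====
def maxbucv_alt (a : List String) : Int :=
  a.foldl (fun m r =>
    let n : Int := (r.toList.length : Int)
    if n > m then n else m) 0

-- ===== PRECONDITION & SPEC =====
def Spec_maxbucv (a : List String) (out : Int) : Prop := out = maxbucv_alt a
instance (a : List String) (out : Int) : Decidable (Spec_maxbucv a out) := by unfold Spec_maxbucv; infer_instance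

-- ===== CLAIM (what is proved, stated in full; the proofs are below) =====
def Claim_equal_maxbucv : Prop := ∀ (a : List String), Dom_maxbucv a → Spec_maxbucv a (maxbucv a)

-- ===== LEMMAS AND PROOFS =====

theorem maxbucvInner_diag (fuel : Nat) (n j : Int) (h : (n - j).toNat ≤ fuel) :
    maxbucvInner n j j = (max j n, max j n) := by
  induction fuel generalizing j with
  | zero =>
    rw [maxbucvInner]
    have : ¬ j < n := by omega
    simp [this]
    omega
  | succ f ih =>
    rw [maxbucvInner]
    by_cases hj : j < n
    · simp only [hj, if_true]
      rw [ih (j + 1) (by omega)]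
      have : max (j + 1) n = max j n := by omega
      rw [this]
    · simp [hj]
      omega

theorem maxbucvLoop_eq (rest : List String) : ∀ (j m : Int), j ≤ m →
    maxbucvLoop rest j j m
      = rest.foldl (fun m r =>
          let n : Int := (r.toList.length : Int)
          if n > m then n else m) m := by
  induction rest with
  | nil => intro j m _; rfl
  | cons s rest ih =>
    intro j m hjm
    simp only [maxbucvLoop, List.foldl]
    rw [maxbucvInner_diag (((s.toList.length : Int) - j).toNat) _ _ (le_refl _)]
    set L : Int := (s.toList.length : Int) with hL
    have h1 : (if max j L > m then max j L else m) = (if L > m then L else m) := by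
      split_ifs <;> omega
    rw [h1, ih (max j L) (if L > m then L else m) (by split_ifs <;> omega)]

-- ===== VERDICT (by name: the statement is the Claim_ definition above) =====
theorem maxbucv_spec : Claim_equal_maxbucv := by
  intro a _
  unfold Spec_maxbucv maxbucv maxbucv_alt
  exact maxbucvLoop_eq a 0 0 (le_refl 0)
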